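-- pv_equiv track=rewrite | github.com/tchtinku/Ace_Programming | Multidimensional_Arrays/MatrixFlipBit/OptimisedApproach/MatrixFlipBit.py | count_flipped_bits
-- ===== SOURCE A (Python) =====
-- def count_flipped_bits(matrix):
--     """
--     Count the number of 1s in the same row or column as any 0 in the matrix,
--     ensuring rows and columns are not rechecked using visited arrays.
--
--     Parameters:
--     matrix (list of lists): Input 2D binary matrix.
--
--     Returns:
--     int: Count of 1s to be flipped.
--     """
--     n = len(matrix)
--     visitedRow = [False]*n
--     visitedCol = [False]*n
--     zeroPositions = []
--
--     # Step 2: Locate all 0s in the matrix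
--     for i in range(n):
--         for j in range(n):
--             if matrix[i][j] == 0:
--                 zeroPositions.append((i, j))
--
--     count = 0
--
--     # Step 3: Process rows and cols of all 0s
--     for i, j in zeroPositions:
--         # check if the row is already visited
--         if not visitedRow[i]:
--             # Traverse the row
--             for col in range(n):
--                 if matrix[i][col] == 1:
--                     count += 1
--                     matrix[i][col] = -1
--             visitedRow[i] = True
--
--         # Check if the column is already visited
--         if not visitedCol[j]:
--             # Traverse the column
--             for row in range(n):
--                 if matrix[row][j] == 1:
--                     count += 1
--                     matrix[row][j] = -1
--             visitedCol[j] = True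
--
--     return count
-- ===== SOURCE B (Python) =====
-- def count_flipped_bits(matrix):
--     n = len(matrix)
--     zero_rows = set()
--     zero_cols = set()
--     for i in range(n):
--         for j in range(n):
--             if matrix[i][j] == 0:
--                 zero_rows.add(i)
--                 zero_cols.add(j)
--     count = 0
--     for i in range(n):
--         for j in range(n):
--             if matrix[i][j] == 1 and (i in zero_rows or j in zero_cols):
--                 count += 1
--                 matrix[i][j] = -1
--     return count
-- ===== Notes on version B (the rewrite author's own statement) =====
-- stated objective: simpler
-- what changed: Replaces A's zero-position list plus visited-row/visited-column bookkeeping and per-zero row/column scans by two plain passes: one pass collecting the sets of rows and columns that contain a 0, and one pass counting (and flipping to -1, as A does) every 1 whose row or column is in those sets.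
import Mathlib
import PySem

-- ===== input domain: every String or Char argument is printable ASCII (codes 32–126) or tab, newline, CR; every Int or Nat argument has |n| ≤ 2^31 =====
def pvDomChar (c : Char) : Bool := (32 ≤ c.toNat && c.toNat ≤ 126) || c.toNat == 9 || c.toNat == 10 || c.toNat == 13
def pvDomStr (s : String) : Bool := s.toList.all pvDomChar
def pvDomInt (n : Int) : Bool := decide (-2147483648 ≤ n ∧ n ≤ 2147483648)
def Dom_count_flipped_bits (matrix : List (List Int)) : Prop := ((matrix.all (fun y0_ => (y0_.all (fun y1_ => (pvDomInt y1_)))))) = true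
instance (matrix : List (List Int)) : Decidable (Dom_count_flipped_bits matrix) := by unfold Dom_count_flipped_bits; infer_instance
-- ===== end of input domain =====

-- B replaces A's zero-position list + visited-row/column bookkeeping by two plain passes
-- (collect zero-row/zero-column sets, then count-and-flip); B performs the same in-place
-- mutation (1 → -1) as A, and the theorem below is about the return value.

-- ===== PORT A =====
-- cell read matrix[i][j] / write matrix[i][j] = -1 (defaults only reached outside Pre_,
-- where Python raises IndexError)
def pvCell (m : List (List Int)) (i j : Nat) : Int := (m.getD i []).getD j 2
def pvFlip (m : List (List Int)) (i j : Nat) : List (List Int) :=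
  m.set i ((m.getD i []).set j (-1))

-- Step 2 of A: collect the positions of all 0s, row-major
def aZeros (m : List (List Int)) (n : Nat) : List (Nat × Nat) :=
  (List.range n).foldl (fun acc i =>
    (List.range n).foldl (fun acc j =>
      if pvCell m i j == 0 then acc ++ [(i, j)] else acc) acc) []

-- "Traverse the row": for col in range(n): if matrix[i][col]==1: count+=1; matrix[i][col]=-1
def aRow (n i : Nat) (st : List (List Int) × Int) : List (List Int) × Int :=
  (List.range n).foldl (fun st col =>
    if pvCell st.1 i col == 1 then (pvFlip st.1 i col, st.2 + 1) else st) st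

-- "Traverse the column"
def aCol (n j : Nat) (st : List (List Int) × Int) : List (List Int) × Int :=
  (List.range n).foldl (fun st row =>
    if pvCell st.1 row j == 1 then (pvFlip st.1 row j, st.2 + 1) else st) st

structure AState where
  mat : List (List Int)
  vRow : List Bool
  vCol : List Bool
  cnt : Int
deriving Repr, DecidableEq

-- body of A's loop "for i, j in zeroPositions"
def aStep (n : Nat) (st : AState) (p : Nat × Nat) : AState :=
  let st1 :=
    if st.vRow.getD p.1 false then st
    else
      let mc := aRow n p.1 (st.mat, st.cnt)
      { mat := mc.1, vRow := st.vRow.set p.1 true, vCol := st.vCol, cnt := mc.2 }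
  if st1.vCol.getD p.2 false then st1
  else
    let mc := aCol n p.2 (st1.mat, st1.cnt)
    { mat := mc.1, vRow := st1.vRow, vCol := st1.vCol.set p.2 true, cnt := mc.2 }

def count_flipped_bits (matrix : List (List Int)) : Int :=
  let n := matrix.length
  ((aZeros matrix n).foldl (aStep n)
    ⟨matrix, List.replicate n false, List.replicate n false, 0⟩).cnt

-- ===== PORT B =====
-- first pass of B: zero_rows / zero_cols as Python sets
def bSets (m : List (List Int)) (n : Nat) : PySem.Set Nat × PySem.Set Nat :=
  (List.range n).foldl (fun zs i =>
    (List.range n).foldl (fun zs j =>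
      if pvCell m i j == 0 then (PySem.Set.add zs.1 i, PySem.Set.add zs.2 j) else zs) zs)
    (PySem.Set.empty, PySem.Set.empty)

def count_flipped_bits_alt (matrix : List (List Int)) : Int :=
  let n := matrix.length
  let zs := bSets matrix n
  ((List.range n).foldl (fun st i =>
    (List.range n).foldl (fun st j =>
      if (pvCell st.1 i j == 1) && (PySem.Set.contains zs.1 i || PySem.Set.contains zs.2 j)
      then (pvFlip st.1 i j, st.2 + 1) else st) st)
    (matrix, (0 : Int))).2

-- ===== PRECONDITION & SPEC =====
-- Pre_ excludes exactly the ragged matrices with a row shorter than len(matrix), on which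
-- Python A raises IndexError (and Python B raises identically).
def Pre_count_flipped_bits (matrix : List (List Int)) : Prop :=
  ∀ r ∈ matrix, matrix.length ≤ r.length
instance (matrix : List (List Int)) : Decidable (Pre_count_flipped_bits matrix) := by
  unfold Pre_count_flipped_bits; infer_instance

def pvWitness_count_flipped_bits : List (List Int) := [[0, 1], [1, 1]]

def Spec_count_flipped_bits (matrix : List (List Int)) (out : Int) : Prop := out = count_flipped_bits_alt matrix
instance (matrix : List (List Int)) (out : Int) : Decidable (Spec_count_flipped_bits matrix out) := by unfold Spec_count_flipped_bits; infer_instance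

-- ===== CLAIM (what is proved, stated in full; the proofs are below) =====
def Claim_equal_count_flipped_bits : Prop := ∀ (matrix : List (List Int)), Dom_count_flipped_bits matrix → Pre_count_flipped_bits matrix → Spec_count_flipped_bits matrix (count_flipped_bits matrix)

-- ===== LEMMAS AND PROOFS =====

-- the row-major list of all cell positions of the n×n grid
def lexPs (n : Nat) : List (Nat × Nat) :=
  (List.range n).flatMap (fun i => (List.range n).map (fun j => (i, j)))

-- generic count-and-flip scan: both A's row/column traversals and B's second pass are
-- instances (Q = extra cell-independent test)
def scan (Q : Nat × Nat → Bool) (ps : List (Nat × Nat)) (st : List (List Int) × Int) :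
    List (List Int) × Int :=
  ps.foldl (fun st p =>
    if (pvCell st.1 p.1 p.2 == 1) && Q p then (pvFlip st.1 p.1 p.2, st.2 + 1) else st) st

def Rb (zs : List (Nat × Nat)) (i : Nat) : Bool := zs.any (fun p => p.1 == i)
def Cb (zs : List (Nat × Nat)) (j : Nat) : Bool := zs.any (fun p => p.2 == j)

-- the cells A has flipped after processing the zero positions zs
-- cells flipped so far, for abstract row/column predicates R, C
def qB (M : List (List Int)) (n : Nat) (R C : Nat → Bool) (p : Nat × Nat) : Bool :=
  decide (p.1 < n) && decide (p.2 < n) && (pvCell M p.1 p.2 == 1) && (R p.1 || C p.2)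

def qP (M : List (List Int)) (n : Nat) (zs : List (Nat × Nat)) : Nat × Nat → Bool :=
  qB M n (Rb zs) (Cb zs)

def CC (n : Nat) (P : Nat × Nat → Bool) : Nat :=
  ∑ i ∈ Finset.range n, ∑ j ∈ Finset.range n, if P (i, j) then 1 else 0

def AInv2 (M : List (List Int)) (n : Nat) (R C : Nat → Bool) (st : AState) : Prop :=
  st.vRow.length = n ∧ st.vCol.length = n ∧
  (∀ i, st.vRow.getD i false = R i) ∧
  (∀ j, st.vCol.getD j false = C j) ∧
  (∀ p : Nat × Nat, pvCell st.mat p.1 p.2 = if qB M n R C p then -1 else pvCell M p.1 p.2) ∧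
  st.cnt = (CC n (qB M n R C) : Int)

def AInv (M : List (List Int)) (n : Nat) (zs : List (Nat × Nat)) (st : AState) : Prop :=
  AInv2 M n (Rb zs) (Cb zs) st

lemma pvCell_oob {m : List (List Int)} {i j : Nat}
    (h : ¬(i < m.length ∧ j < (m.getD i []).length)) : pvCell m i j = 2 := by
  unfold pvCell
  simp only [List.getD_eq_getElem?_getD] at h ⊢
  rcases Nat.lt_or_ge i m.length with hi | hi
  · simp only [List.getElem?_eq_getElem hi, Option.getD_some] at h ⊢
    have hj : m[i].length ≤ j := by omega
    simp [List.getElem?_eq_none hj]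
  · simp [List.getElem?_eq_none hi]

lemma pvCell_flip_ne {m : List (List Int)} {i j i' j' : Nat} (h : ¬(i = i' ∧ j = j')) :
    pvCell (pvFlip m i j) i' j' = pvCell m i' j' := by
  unfold pvCell pvFlip
  by_cases hii : i = i'
  · subst hii
    have hjj : j ≠ j' := by tauto
    simp only [List.getD_eq_getElem?_getD, List.getElem?_set_self']
    rcases Nat.lt_or_ge i m.length with hi | hi
    · simp [hi, List.getElem?_set_ne hjj]
    · simp [Nat.not_lt.2 hi]
  · simp [List.getD_eq_getElem?_getD, List.getElem?_set_ne hii]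

lemma pvCell_flip_self {m : List (List Int)} {i j : Nat}
    (h : pvCell m i j = 1) : pvCell (pvFlip m i j) i j = -1 := by
  have hb : i < m.length ∧ j < (m.getD i []).length := by
    by_contra hc
    rw [pvCell_oob hc] at h
    omega
  obtain ⟨h1, h2⟩ := hb
  simp only [List.getD_eq_getElem?_getD, List.getElem?_eq_getElem h1, Option.getD_some] at h2
  unfold pvCell pvFlip
  simp only [List.getD_eq_getElem?_getD, List.getElem?_set_self']
  simp [List.getElem?_eq_getElem h1, List.getElem?_set_self h2]

lemma scan_cnt (Q : Nat × Nat → Bool) :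
    ∀ (ps : List (Nat × Nat)) (m : List (List Int)) (c : Int), ps.Nodup →
    (scan Q ps (m, c)).2 = c + (ps.countP (fun p => (pvCell m p.1 p.2 == 1) && Q p) : Int)
  | [], m, c, _ => by simp [scan]
  | p :: ps, m, c, hnd => by
    have hnd' := (List.nodup_cons.mp hnd).2
    have hpm := (List.nodup_cons.mp hnd).1
    rw [scan, List.foldl_cons]
    by_cases hc : (pvCell m p.1 p.2 == 1) && Q p
    · rw [if_pos hc]
      have ih := scan_cnt Q ps (pvFlip m p.1 p.2) (c + 1) hnd'
      rw [scan] at ih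
      rw [ih, List.countP_congr (fun q hq => by
        rw [pvCell_flip_ne (by
          intro ⟨h1, h2⟩
          exact hpm ((Prod.ext h1 h2) ▸ hq))]),
        List.countP_cons, if_pos hc]
      push_cast; ring
    · rw [if_neg hc]
      have ih := scan_cnt Q ps m c hnd'
      rw [scan] at ih
      rw [ih, List.countP_cons, if_neg hc]
      simp

lemma scan_mat (Q : Nat × Nat → Bool) :
    ∀ (ps : List (Nat × Nat)) (m : List (List Int)) (c : Int), ps.Nodup →
    ∀ q : Nat × Nat, pvCell (scan Q ps (m, c)).1 q.1 q.2 =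
      if q ∈ ps ∧ (pvCell m q.1 q.2 == 1) && Q q then -1 else pvCell m q.1 q.2
  | [], m, c, _, q => by simp [scan]
  | p :: ps, m, c, hnd, q => by
    have hnd' := (List.nodup_cons.mp hnd).2
    have hpm := (List.nodup_cons.mp hnd).1
    rw [scan, List.foldl_cons]
    by_cases hc : (pvCell m p.1 p.2 == 1) && Q p
    · rw [if_pos hc]
      have ih := scan_mat Q ps (pvFlip m p.1 p.2) (c + 1) hnd' q
      rw [scan] at ih
      rw [ih]
      by_cases hq : q = p
      · subst hq
        have hq1 : q ∉ ps := hpm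
        rw [if_neg (by tauto), if_pos ⟨List.mem_cons_self, hc⟩]
        have hc1 : pvCell m q.1 q.2 = 1 := by
          simp only [Bool.and_eq_true, beq_iff_eq] at hc
          exact hc.1
        exact pvCell_flip_self hc1
      · have hne : pvCell (pvFlip m p.1 p.2) q.1 q.2 = pvCell m q.1 q.2 :=
          pvCell_flip_ne (by
            intro ⟨h1, h2⟩
            exact hq (Prod.ext h1.symm h2.symm))
        rw [hne]
        congr 1
        simp [List.mem_cons, hq]
    · rw [if_neg hc]
      have ih := scan_mat Q ps m c hnd' q
      rw [scan] at ih
      rw [ih]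
      by_cases hq : q = p
      · subst hq
        rw [if_neg (by tauto), if_neg (by
          simp only [List.mem_cons]
          tauto)]
      · congr 1
        simp [List.mem_cons, hq]

lemma mem_lexPs {n : Nat} {p : Nat × Nat} : p ∈ lexPs n ↔ p.1 < n ∧ p.2 < n := by
  obtain ⟨a, b⟩ := p
  simp [lexPs]

lemma nodup_lexPs (n : Nat) : (lexPs n).Nodup :=
  List.Nodup.product (List.nodup_range) (List.nodup_range)

lemma countP_range_eq_sum (n : Nat) (p : Nat → Bool) :
    (List.range n).countP p = ∑ j ∈ Finset.range n, if p j then 1 else 0 := by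
  induction n with
  | zero => simp
  | succ k ih => rw [List.range_succ, List.countP_append, Finset.sum_range_succ, ih]; simp [List.countP_cons]

lemma countP_lexPs_eq_CC (n : Nat) (P : Nat × Nat → Bool) :
    (lexPs n).countP P = CC n P := by
  unfold lexPs CC
  rw [List.countP_flatMap]
  have : ∀ i : Nat, ((List.range n).map (fun j => (i, j))).countP P
      = ∑ j ∈ Finset.range n, if P (i, j) then 1 else 0 := by
    intro i
    rw [List.countP_map, countP_range_eq_sum]
    rfl
  calc ((List.range n).map fun a => List.countP P ((List.range n).map fun j => (a, j))).sum
      = ((List.range n).map fun a => ∑ j ∈ Finset.range n, if P (a, j) then 1 else 0).sum := by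
        simp only [this]
    _ = ∑ i ∈ Finset.range n, ∑ j ∈ Finset.range n, if P (i, j) then 1 else 0 := rfl

lemma CC_split (n : Nat) (p q : Nat × Nat → Bool)
    (h : ∀ x : Nat × Nat, p x = true → q x = true) :
    CC n q = CC n p + CC n (fun x => q x && !p x) := by
  unfold CC
  rw [← Finset.sum_add_distrib]
  refine Finset.sum_congr rfl fun i _ => ?_
  rw [← Finset.sum_add_distrib]
  refine Finset.sum_congr rfl fun j _ => ?_
  by_cases hp : p (i, j) <;> by_cases hq : q (i, j) <;>
    simp_all

lemma CC_row (n i : Nat) (hi : i < n) (P : Nat × Nat → Bool)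
    (hP : ∀ p : Nat × Nat, P p = true → p.1 = i) :
    CC n P = (List.range n).countP (fun j => P (i, j)) := by
  unfold CC
  rw [countP_range_eq_sum]
  rw [Finset.sum_eq_single_of_mem i (Finset.mem_range.mpr hi)]
  intro b _ hb
  refine Finset.sum_eq_zero fun j _ => ?_
  have : P (b, j) = false := by
    by_contra hc
    exact hb (hP (b, j) (by simpa using hc))
  simp [this]

lemma CC_col (n j : Nat) (hj : j < n) (P : Nat × Nat → Bool)
    (hP : ∀ p : Nat × Nat, P p = true → p.2 = j) :
    CC n P = (List.range n).countP (fun i => P (i, j)) := by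
  unfold CC
  rw [countP_range_eq_sum]
  refine Finset.sum_congr rfl fun i _ => ?_
  rw [Finset.sum_eq_single_of_mem j (Finset.mem_range.mpr hj)]
  intro b _ hb
  have : P (i, b) = false := by
    by_contra hc
    exact hb (hP (i, b) (by simpa using hc))
  simp [this]

lemma CC_congr (n : Nat) (p q : Nat × Nat → Bool)
    (h : ∀ x : Nat × Nat, x.1 < n → x.2 < n → p x = q x) : CC n p = CC n q := by
  unfold CC
  refine Finset.sum_congr rfl fun i hi => Finset.sum_congr rfl fun j hj => ?_
  rw [h (i, j) (Finset.mem_range.mp hi) (Finset.mem_range.mp hj)]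


lemma getD_set {α : Type} (l : List α) (i x : Nat) (v d : α) :
    (l.set i v).getD x d = if x = i ∧ i < l.length then v else l.getD x d := by
  simp only [List.getD_eq_getElem?_getD, List.getElem?_set]
  by_cases h1 : i = x
  · subst h1
    rw [if_pos rfl]
    by_cases h2 : i < l.length
    · simp [h2]
    · rw [if_neg h2, if_neg (by tauto), List.getElem?_eq_none (show l.length ≤ i by omega)]
  · rw [if_neg h1, if_neg (fun hc => h1 hc.1.symm)]

lemma nodup_rowPs (n i : Nat) : (((List.range n).map (fun c => (i, c))) : List (Nat × Nat)).Nodup :=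
  List.Nodup.map (fun _ _ h => congrArg Prod.snd h) List.nodup_range

lemma nodup_colPs (n j : Nat) : (((List.range n).map (fun r => (r, j))) : List (Nat × Nat)).Nodup :=
  List.Nodup.map (fun _ _ h => congrArg Prod.fst h) List.nodup_range

lemma aRow_eq (n i : Nat) (st : List (List Int) × Int) :
    aRow n i st = scan (fun _ => true) ((List.range n).map (fun c => (i, c))) st := by
  unfold aRow scan
  rw [List.foldl_map]
  simp

lemma aCol_eq (n j : Nat) (st : List (List Int) × Int) :
    aCol n j st = scan (fun _ => true) ((List.range n).map (fun r => (r, j))) st := by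
  unfold aCol scan
  rw [List.foldl_map]
  simp

lemma Rb_append (zs : List (Nat × Nat)) (p : Nat × Nat) (x : Nat) :
    Rb (zs ++ [p]) x = (Rb zs x || (p.1 == x)) := by
  simp [Rb]

lemma Cb_append (zs : List (Nat × Nat)) (p : Nat × Nat) (x : Nat) :
    Cb (zs ++ [p]) x = (Cb zs x || (p.2 == x)) := by
  simp [Cb]

-- the cell test A's scans make on the current matrix, in terms of the original matrix
lemma cell_cur_one (M : List (List Int)) (n : Nat) (R C : Nat → Bool) (mat : List (List Int))
    (hM : ∀ p : Nat × Nat, pvCell mat p.1 p.2 = if qB M n R C p then -1 else pvCell M p.1 p.2)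
    (x : Nat × Nat) :
    (pvCell mat x.1 x.2 == 1) = ((pvCell M x.1 x.2 == 1) && !(qB M n R C x)) := by
  rw [hM x]
  by_cases hq : qB M n R C x <;> simp [hq]

lemma qB_mono_row (M : List (List Int)) (n : Nat) (R C : Nat → Bool) (i : Nat)
    (x : Nat × Nat) (h : qB M n R C x = true) : qB M n (fun r => R r || (r == i)) C x = true := by
  simp only [qB, Bool.and_eq_true, Bool.or_eq_true] at h ⊢
  tauto

lemma qB_mono_col (M : List (List Int)) (n : Nat) (R C : Nat → Bool) (j : Nat)
    (x : Nat × Nat) (h : qB M n R C x = true) : qB M n R (fun c => C c || (c == j)) x = true := by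
  simp only [qB, Bool.and_eq_true, Bool.or_eq_true] at h ⊢
  tauto

lemma AInv2_congr {M : List (List Int)} {n : Nat} {R R' C C' : Nat → Bool} {st : AState}
    (hR : ∀ x, R x = R' x) (hC : ∀ x, C x = C' x) (h : AInv2 M n R C st) : AInv2 M n R' C' st := by
  obtain ⟨h1, h2, h3, h4, h5, h6⟩ := h
  have hq : ∀ x, qB M n R C x = qB M n R' C' x := by
    intro x
    simp only [qB, hR, hC]
  exact ⟨h1, h2, fun x => (h3 x).trans (hR x), fun x => (h4 x).trans (hC x),
    fun p => (h5 p).trans (by rw [hq p]),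
    h6.trans (by rw [CC_congr n _ _ (fun x _ _ => hq x)])⟩

lemma rowHalf (M : List (List Int)) (n : Nat) (R C : Nat → Bool) (st : AState) (i : Nat)
    (hi : i < n) (hInv : AInv2 M n R C st) :
    AInv2 M n (fun r => R r || (r == i)) C
      (if st.vRow.getD i false then st
       else { mat := (aRow n i (st.mat, st.cnt)).1, vRow := st.vRow.set i true,
              vCol := st.vCol, cnt := (aRow n i (st.mat, st.cnt)).2 }) := by
  obtain ⟨hRl, hCl, hR, hC, hM, hcnt⟩ := hInv
  by_cases hv : st.vRow.getD i false
  · rw [if_pos hv]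
    have hRi : R i = true := (hR i).symm.trans hv
    exact AInv2_congr (R := R) (C := C)
      (fun x => by
        show R x = (R x || (x == i))
        by_cases hx : x = i
        · subst hx; simp [hRi]
        · simp [beq_eq_false_iff_ne.mpr hx])
      (fun x => rfl) ⟨hRl, hCl, hR, hC, hM, hcnt⟩
  · rw [if_neg hv]
    rw [Bool.not_eq_true] at hv
    have hRi : R i = false := (hR i).symm.trans hv
    have hscan := aRow_eq n i (st.mat, st.cnt)
    have hnd := nodup_rowPs n i
    have hmem : ∀ a b : Nat,
        ((a, b) ∈ (List.range n).map (fun c => ((i, c) : Nat × Nat))) ↔ (a = i ∧ b < n) := by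
      intro a b
      constructor
      · intro h
        obtain ⟨c, hc, hcq⟩ := List.mem_map.mp h
        obtain ⟨h1, h2⟩ := Prod.mk.injEq _ _ _ _ ▸ hcq
        exact ⟨h1.symm, h2 ▸ List.mem_range.mp hc⟩
      · rintro ⟨rfl, hb⟩
        exact List.mem_map.mpr ⟨b, List.mem_range.mpr hb, rfl⟩
    refine ⟨by simpa using hRl, hCl, ?_, hC, ?_, ?_⟩
    · -- visited rows
      intro x
      show (st.vRow.set i true).getD x false = (R x || (x == i))
      rw [getD_set]
      by_cases hx : x = i
      · subst hx; simp [hRl, hi]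
      · rw [if_neg (by tauto), hR x, beq_eq_false_iff_ne.mpr hx, Bool.or_false]
    · -- matrix cells
      rintro ⟨q1, q2⟩
      show pvCell (aRow n i (st.mat, st.cnt)).1 q1 q2 = _
      rw [hscan, scan_mat _ _ _ _ hnd (q1, q2)]
      by_cases hq1 : qB M n R C (q1, q2) = true
      · have hmq : pvCell st.mat q1 q2 = -1 := by
          have := hM (q1, q2); rwa [if_pos hq1] at this
        rw [hmq, if_neg (by simp), if_pos (qB_mono_row M n R C i _ hq1)]
      · have hmq : pvCell st.mat q1 q2 = pvCell M q1 q2 := by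
          have := hM (q1, q2); rwa [if_neg hq1] at this
        rw [hmq]
        by_cases hqi : q1 = i
        · subst hqi
          by_cases hq2 : q2 < n
          · by_cases hcell : pvCell M q1 q2 = 1
            · rw [if_pos ⟨(hmem q1 q2).mpr ⟨rfl, hq2⟩, by simp [hcell]⟩,
                if_pos (by simp [qB, hi, hq2, hcell])]
            · rw [if_neg (by
                  rintro ⟨-, hb⟩
                  simp only [Bool.and_eq_true, beq_iff_eq] at hb
                  exact hcell hb.1),
                if_neg (by simp [qB, hcell])]
          · rw [if_neg (by rintro ⟨hm, -⟩; exact hq2 ((hmem q1 q2).mp hm).2),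
              if_neg (by simp [qB, hq2])]
        · rw [if_neg (by rintro ⟨hm, -⟩; exact hqi ((hmem q1 q2).mp hm).1),
            if_neg (fun hqB => hq1 (by
              simp only [qB, Bool.and_eq_true, Bool.or_eq_true, beq_iff_eq] at hqB ⊢
              tauto))]
    · -- count
      show (aRow n i (st.mat, st.cnt)).2 = _
      rw [hscan, scan_cnt _ _ _ _ hnd, hcnt]
      rw [CC_split n (qB M n R C) (qB M n (fun r => R r || (r == i)) C)
        (qB_mono_row M n R C i)]
      push_cast
      congr 1
      rw [CC_row n i hi _ (by
        rintro ⟨x1, x2⟩ hx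
        simp only [Bool.and_eq_true, Bool.not_eq_true'] at hx
        by_cases hxi : x1 = i
        · exact hxi
        · exfalso
          obtain ⟨hq', hqf⟩ := hx
          apply absurd hq'
          simp only [qB, beq_eq_false_iff_ne.mpr hxi, Bool.or_false] at hqf ⊢
          simp [hqf])]
      rw [List.countP_map]
      norm_cast
      apply List.countP_congr
      intro c hc
      have hcn : c < n := List.mem_range.mp hc
      simp only [Function.comp]
      rw [cell_cur_one M n R C st.mat hM (i, c)]
      simp only [qB, hi, hcn, beq_self_eq_true, decide_true, Bool.true_and, Bool.or_true,
        Bool.true_or, Bool.and_true, hRi, Bool.false_or]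

lemma colHalf (M : List (List Int)) (n : Nat) (R C : Nat → Bool) (st : AState) (j : Nat)
    (hj : j < n) (hInv : AInv2 M n R C st) :
    AInv2 M n R (fun c => C c || (c == j))
      (if st.vCol.getD j false then st
       else { mat := (aCol n j (st.mat, st.cnt)).1, vRow := st.vRow,
              vCol := st.vCol.set j true, cnt := (aCol n j (st.mat, st.cnt)).2 }) := by
  obtain ⟨hRl, hCl, hR, hC, hM, hcnt⟩ := hInv
  by_cases hv : st.vCol.getD j false
  · rw [if_pos hv]
    have hCj : C j = true := (hC j).symm.trans hv
    exact AInv2_congr (R := R) (C := C)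
      (fun x => rfl)
      (fun x => by
        show C x = (C x || (x == j))
        by_cases hx : x = j
        · subst hx; simp [hCj]
        · simp [beq_eq_false_iff_ne.mpr hx]) ⟨hRl, hCl, hR, hC, hM, hcnt⟩
  · rw [if_neg hv]
    rw [Bool.not_eq_true] at hv
    have hCj : C j = false := (hC j).symm.trans hv
    have hscan := aCol_eq n j (st.mat, st.cnt)
    have hnd := nodup_colPs n j
    have hmem : ∀ a b : Nat,
        ((a, b) ∈ (List.range n).map (fun r => ((r, j) : Nat × Nat))) ↔ (b = j ∧ a < n) := by
      intro a b
      constructor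
      · intro h
        obtain ⟨r, hr, hrq⟩ := List.mem_map.mp h
        obtain ⟨h1, h2⟩ := Prod.mk.injEq _ _ _ _ ▸ hrq
        exact ⟨h2.symm, h1 ▸ List.mem_range.mp hr⟩
      · rintro ⟨rfl, hb⟩
        exact List.mem_map.mpr ⟨a, List.mem_range.mpr hb, rfl⟩
    refine ⟨hRl, by simpa using hCl, hR, ?_, ?_, ?_⟩
    · -- visited columns
      intro x
      show (st.vCol.set j true).getD x false = (C x || (x == j))
      rw [getD_set]
      by_cases hx : x = j
      · subst hx; simp [hCl, hj]
      · rw [if_neg (by tauto), hC x, beq_eq_false_iff_ne.mpr hx, Bool.or_false]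
    · -- matrix cells
      rintro ⟨q1, q2⟩
      show pvCell (aCol n j (st.mat, st.cnt)).1 q1 q2 = _
      rw [hscan, scan_mat _ _ _ _ hnd (q1, q2)]
      by_cases hq1 : qB M n R C (q1, q2) = true
      · have hmq : pvCell st.mat q1 q2 = -1 := by
          have := hM (q1, q2); rwa [if_pos hq1] at this
        rw [hmq, if_neg (by simp), if_pos (qB_mono_col M n R C j _ hq1)]
      · have hmq : pvCell st.mat q1 q2 = pvCell M q1 q2 := by
          have := hM (q1, q2); rwa [if_neg hq1] at this
        rw [hmq]
        by_cases hqj : q2 = j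
        · subst hqj
          by_cases hq2 : q1 < n
          · by_cases hcell : pvCell M q1 q2 = 1
            · rw [if_pos ⟨(hmem q1 q2).mpr ⟨rfl, hq2⟩, by simp [hcell]⟩,
                if_pos (by simp [qB, hj, hq2, hcell])]
            · rw [if_neg (by
                  rintro ⟨-, hb⟩
                  simp only [Bool.and_eq_true, beq_iff_eq] at hb
                  exact hcell hb.1),
                if_neg (by simp [qB, hcell])]
          · rw [if_neg (by rintro ⟨hm, -⟩; exact hq2 ((hmem q1 q2).mp hm).2),
              if_neg (by simp [qB, hq2])]
        · rw [if_neg (by rintro ⟨hm, -⟩; exact hqj ((hmem q1 q2).mp hm).1),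
            if_neg (fun hqB => hq1 (by
              simp only [qB, Bool.and_eq_true, Bool.or_eq_true, beq_iff_eq] at hqB ⊢
              tauto))]
    · -- count
      show (aCol n j (st.mat, st.cnt)).2 = _
      rw [hscan, scan_cnt _ _ _ _ hnd, hcnt]
      rw [CC_split n (qB M n R C) (qB M n R (fun c => C c || (c == j)))
        (qB_mono_col M n R C j)]
      push_cast
      congr 1
      rw [CC_col n j hj _ (by
        rintro ⟨x1, x2⟩ hx
        simp only [Bool.and_eq_true, Bool.not_eq_true'] at hx
        by_cases hxj : x2 = j
        · exact hxj
        · exfalso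
          obtain ⟨hq', hqf⟩ := hx
          apply absurd hq'
          simp only [qB, beq_eq_false_iff_ne.mpr hxj, Bool.or_false] at hqf ⊢
          simp [hqf])]
      rw [List.countP_map]
      norm_cast
      apply List.countP_congr
      intro r hr
      have hrn : r < n := List.mem_range.mp hr
      simp only [Function.comp]
      rw [cell_cur_one M n R C st.mat hM (r, j)]
      simp only [qB, hj, hrn, beq_self_eq_true, decide_true, Bool.true_and, Bool.or_true,
        Bool.and_true, hCj, Bool.or_false]

lemma aStep_inv (M : List (List Int)) (n : Nat) (zs : List (Nat × Nat)) (st : AState)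
    (p : Nat × Nat) (hp1 : p.1 < n) (hp2 : p.2 < n) (hInv : AInv M n zs st) :
    AInv M n (zs ++ [p]) (aStep n st p) := by
  have h1 := rowHalf M n (Rb zs) (Cb zs) st p.1 hp1 hInv
  have h2 := colHalf M n (fun r => Rb zs r || (r == p.1)) (Cb zs) _ p.2 hp2 h1
  show AInv2 M n (Rb (zs ++ [p])) (Cb (zs ++ [p])) (aStep n st p)
  refine AInv2_congr (fun x => ?_) (fun x => ?_) h2
  · show (Rb zs x || (x == p.1)) = Rb (zs ++ [p]) x
    rw [Rb_append]
    congr 1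
    by_cases hx : x = p.1
    · subst hx; simp
    · rw [beq_eq_false_iff_ne.mpr hx, beq_eq_false_iff_ne.mpr (fun h => hx h.symm)]
  · show (Cb zs x || (x == p.2)) = Cb (zs ++ [p]) x
    rw [Cb_append]
    congr 1
    by_cases hx : x = p.2
    · subst hx; simp
    · rw [beq_eq_false_iff_ne.mpr hx, beq_eq_false_iff_ne.mpr (fun h => hx h.symm)]

lemma foldl_inv (M : List (List Int)) (n : Nat) :
    ∀ (rest procd : List (Nat × Nat)) (st : AState),
    (∀ p ∈ rest, p.1 < n ∧ p.2 < n) → AInv M n procd st →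
    AInv M n (procd ++ rest) (rest.foldl (aStep n) st)
  | [], procd, st, _, hInv => by simpa using hInv
  | p :: rest, procd, st, hb, hInv => by
    rw [List.foldl_cons, List.append_cons]
    exact foldl_inv M n rest (procd ++ [p]) (aStep n st p)
      (fun q hq => hb q (List.mem_cons_of_mem p hq))
      (aStep_inv M n procd st p (hb p List.mem_cons_self).1 (hb p List.mem_cons_self).2 hInv)

lemma aZeros_eq (m : List (List Int)) (n : Nat) :
    aZeros m n = (lexPs n).filter (fun p => pvCell m p.1 p.2 == 0) := by
  unfold aZeros lexPs
  simp only [PySem.List.foldl_append_if]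
  rw [PySem.List.foldl_append_eq_flatMap, List.filter_flatMap]
  simp [List.filter_map, Function.comp_def]

lemma bSets_fold_mem (m : List (List Int)) :
    ∀ (ps : List (Nat × Nat)) (s : PySem.Set Nat × PySem.Set Nat) (x : Nat),
    (x ∈ (ps.foldl (fun zs p => if pvCell m p.1 p.2 == 0
        then (PySem.Set.add zs.1 p.1, PySem.Set.add zs.2 p.2) else zs) s).1 ↔
      x ∈ s.1 ∨ ∃ p ∈ ps, pvCell m p.1 p.2 = 0 ∧ p.1 = x) ∧
    (x ∈ (ps.foldl (fun zs p => if pvCell m p.1 p.2 == 0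
        then (PySem.Set.add zs.1 p.1, PySem.Set.add zs.2 p.2) else zs) s).2 ↔
      x ∈ s.2 ∨ ∃ p ∈ ps, pvCell m p.1 p.2 = 0 ∧ p.2 = x)
  | [], s, x => by simp
  | p :: ps, s, x => by
    rw [List.foldl_cons]
    by_cases hc : pvCell m p.1 p.2 = 0
    · rw [if_pos (by simpa using hc)]
      obtain ⟨ih1, ih2⟩ := bSets_fold_mem m ps (PySem.Set.add s.1 p.1, PySem.Set.add s.2 p.2) x
      constructor
      · rw [ih1]
        simp only [PySem.Set.mem_add, List.mem_cons]
        constructor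
        · rintro ((h | h) | h)
          · exact Or.inl h
          · exact Or.inr ⟨p, Or.inl rfl, hc, h.symm⟩
          · obtain ⟨q, hq, hq0, hqx⟩ := h
            exact Or.inr ⟨q, Or.inr hq, hq0, hqx⟩
        · rintro (h | ⟨q, hq | hq, hq0, hqx⟩)
          · exact Or.inl (Or.inl h)
          · exact Or.inl (Or.inr (hq ▸ hqx).symm)
          · exact Or.inr ⟨q, hq, hq0, hqx⟩
      · rw [ih2]
        simp only [PySem.Set.mem_add, List.mem_cons]
        constructor
        · rintro ((h | h) | h)
          · exact Or.inl h
          · exact Or.inr ⟨p, Or.inl rfl, hc, h.symm⟩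
          · obtain ⟨q, hq, hq0, hqx⟩ := h
            exact Or.inr ⟨q, Or.inr hq, hq0, hqx⟩
        · rintro (h | ⟨q, hq | hq, hq0, hqx⟩)
          · exact Or.inl (Or.inl h)
          · exact Or.inl (Or.inr (hq ▸ hqx).symm)
          · exact Or.inr ⟨q, hq, hq0, hqx⟩
    · rw [if_neg (by simpa using hc)]
      obtain ⟨ih1, ih2⟩ := bSets_fold_mem m ps s x
      constructor
      · rw [ih1]
        simp only [List.mem_cons]
        constructor
        · rintro (h | h)
          · exact Or.inl h
          · obtain ⟨q, hq, hq0, hqx⟩ := h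
            exact Or.inr ⟨q, Or.inr hq, hq0, hqx⟩
        · rintro (h | ⟨q, hq | hq, hq0, hqx⟩)
          · exact Or.inl h
          · exact absurd (hq ▸ hq0) hc
          · exact Or.inr ⟨q, hq, hq0, hqx⟩
      · rw [ih2]
        simp only [List.mem_cons]
        constructor
        · rintro (h | h)
          · exact Or.inl h
          · obtain ⟨q, hq, hq0, hqx⟩ := h
            exact Or.inr ⟨q, Or.inr hq, hq0, hqx⟩
        · rintro (h | ⟨q, hq | hq, hq0, hqx⟩)
          · exact Or.inl h
          · exact absurd (hq ▸ hq0) hc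
          · exact Or.inr ⟨q, hq, hq0, hqx⟩

lemma bSets_eq (m : List (List Int)) (n : Nat) :
    bSets m n = (lexPs n).foldl (fun zs p => if pvCell m p.1 p.2 == 0
      then (PySem.Set.add zs.1 p.1, PySem.Set.add zs.2 p.2) else zs)
      (PySem.Set.empty, PySem.Set.empty) := by
  unfold bSets lexPs
  rw [List.foldl_flatMap]
  simp only [List.foldl_map]

lemma bSets_mem (m : List (List Int)) (n : Nat) :
    (∀ x, x ∈ (bSets m n).1 ↔ ∃ p ∈ lexPs n, pvCell m p.1 p.2 = 0 ∧ p.1 = x) ∧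
    (∀ x, x ∈ (bSets m n).2 ↔ ∃ p ∈ lexPs n, pvCell m p.1 p.2 = 0 ∧ p.2 = x) := by
  constructor
  · intro x
    rw [bSets_eq]
    rw [(bSets_fold_mem m (lexPs n) (PySem.Set.empty, PySem.Set.empty) x).1]
    simp [PySem.Set.empty]
  · intro x
    rw [bSets_eq]
    rw [(bSets_fold_mem m (lexPs n) (PySem.Set.empty, PySem.Set.empty) x).2]
    simp [PySem.Set.empty]

lemma alt_eq (M : List (List Int)) :
    count_flipped_bits_alt M =
      ((lexPs M.length).countP (fun p => (pvCell M p.1 p.2 == 1) &&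
        (PySem.Set.contains (bSets M M.length).1 p.1 ||
         PySem.Set.contains (bSets M M.length).2 p.2)) : Int) := by
  unfold count_flipped_bits_alt
  dsimp only
  have hmain : ((List.range M.length).foldl (fun st i =>
      (List.range M.length).foldl (fun st j =>
        if (pvCell st.1 i j == 1) && (PySem.Set.contains (bSets M M.length).1 i ||
            PySem.Set.contains (bSets M M.length).2 j)
        then (pvFlip st.1 i j, st.2 + 1) else st) st)
      (M, (0 : Int)))
      = scan (fun p => PySem.Set.contains (bSets M M.length).1 p.1 ||
          PySem.Set.contains (bSets M M.length).2 p.2) (lexPs M.length) (M, 0) := by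
    unfold scan lexPs
    rw [List.foldl_flatMap]
    simp only [List.foldl_map]
  rw [hmain, scan_cnt _ _ _ _ (nodup_lexPs M.length)]
  rw [zero_add]

lemma a_eq (M : List (List Int)) :
    count_flipped_bits M =
      (CC M.length (qP M M.length (aZeros M M.length)) : Int) := by
  unfold count_flipped_bits
  dsimp only
  have hcoords : ∀ p ∈ aZeros M M.length, p.1 < M.length ∧ p.2 < M.length := by
    intro p hp
    rw [aZeros_eq] at hp
    exact mem_lexPs.mp (List.mem_filter.mp hp).1
  have hinit : AInv M M.length []
      ⟨M, List.replicate M.length false, List.replicate M.length false, 0⟩ := by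
    have hq0 : ∀ p : Nat × Nat, qB M M.length (Rb []) (Cb []) p = false := by
      intro p
      simp [qB, Rb, Cb]
    refine ⟨by simp, by simp, ?_, ?_, ?_, ?_⟩
    · intro x
      show (List.replicate M.length false).getD x false = Rb [] x
      simp only [Rb, List.any_nil, List.getD_eq_getElem?_getD, List.getElem?_replicate]
      split <;> rfl
    · intro x
      show (List.replicate M.length false).getD x false = Cb [] x
      simp only [Cb, List.any_nil, List.getD_eq_getElem?_getD, List.getElem?_replicate]
      split <;> rfl
    · intro p
      show pvCell M p.1 p.2 = _
      rw [hq0 p]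
      simp
    · show (0 : Int) = (CC M.length (qB M M.length (Rb []) (Cb [])) : Int)
      have : CC M.length (qB M M.length (Rb []) (Cb [])) = 0 := by
        unfold CC
        refine Finset.sum_eq_zero fun i _ => Finset.sum_eq_zero fun j _ => ?_
        rw [hq0 (i, j)]
        rfl
      rw [this]
      rfl
  have h := foldl_inv M M.length (aZeros M M.length) [] _ hcoords hinit
  rw [List.nil_append] at h
  exact h.2.2.2.2.2

-- ===== VERDICT (by name: the statement is the Claim_ definition above) =====
theorem count_flipped_bits_spec : Claim_equal_count_flipped_bits := by
  unfold Claim_equal_count_flipped_bits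
  intro M _ _
  unfold Spec_count_flipped_bits
  rw [a_eq, alt_eq, countP_lexPs_eq_CC]
  norm_cast
  have hzr : ∀ y, Rb (aZeros M M.length) y = PySem.Set.contains (bSets M M.length).1 y := by
    intro y
    rw [Bool.eq_iff_iff]
    unfold PySem.Set.contains
    rw [List.contains_iff_mem, (bSets_mem M M.length).1 y, aZeros_eq]
    simp only [Rb, List.any_eq_true, beq_iff_eq, List.mem_filter]
    constructor
    · rintro ⟨p, ⟨hp1, hp2⟩, hp3⟩
      exact ⟨p, hp1, by simpa using hp2, hp3⟩
    · rintro ⟨p, hp1, hp2, hp3⟩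
      exact ⟨p, ⟨hp1, by simpa using hp2⟩, hp3⟩
  have hzc : ∀ y, Cb (aZeros M M.length) y = PySem.Set.contains (bSets M M.length).2 y := by
    intro y
    rw [Bool.eq_iff_iff]
    unfold PySem.Set.contains
    rw [List.contains_iff_mem, (bSets_mem M M.length).2 y, aZeros_eq]
    simp only [Cb, List.any_eq_true, beq_iff_eq, List.mem_filter]
    constructor
    · rintro ⟨p, ⟨hp1, hp2⟩, hp3⟩
      exact ⟨p, hp1, by simpa using hp2, hp3⟩
    · rintro ⟨p, hp1, hp2, hp3⟩
      exact ⟨p, ⟨hp1, by simpa using hp2⟩, hp3⟩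
  apply CC_congr
  intro x hx1 hx2
  show qB M M.length (Rb (aZeros M M.length)) (Cb (aZeros M M.length)) x = _
  rw [qB, hzr x.1, hzc x.2]
  simp [hx1, hx2]
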